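-- pv_equiv track=rewrite | github.com/tomoicki/JobOffer_DataTransformation | job_offers_data_transformation/data_repair_procedure.py | get_skills_x_plus
-- ===== SOURCE A (Python) =====
-- from collections import Counter
--
-- def get_skills_x_plus(all_skills_jj: list[str], all_skills_nf: list[str], x: int) -> list[str]:
--     """Sums all skills from both datasets, counts their occurrence and discards all with occurrence < x."""
--     all_skills = all_skills_jj + all_skills_nf
--     all_skills_dict = dict(Counter(all_skills))
--     skills_x_plus = []
--     for key, value in all_skills_dict.items():
--         if value >= x:
--             skills_x_plus.append(key)
--     return skills_x_plus
-- ===== SOURCE B (Python) =====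
-- def get_skills_x_plus(all_skills_jj: list[str], all_skills_nf: list[str], x: int) -> list[str]:
--     """Sums all skills from both datasets, counts their occurrence and discards all with occurrence < x.
--
--     Sort-and-group strategy: sort a copy of the concatenated list so equal skills become
--     adjacent, scan it once collecting into a set the skills whose run length is >= x
--     (a run length in the sorted list IS the skill's total count), then emit the
--     qualifying skills in first-appearance order with one pass over the original list.
--     """
--     all_skills = all_skills_jj + all_skills_nf
--     srt = sorted(all_skills)
--     qualifying = set()
--     i = 0
--     while i < len(srt):
--         j = i + 1
--         while j < len(srt) and srt[j] == srt[i]: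
--             j += 1
--         if j - i >= x:
--             qualifying.add(srt[i])
--         i = j
--     skills_x_plus = []
--     for skill in all_skills:
--         if skill in qualifying and skill not in skills_x_plus:
--             skills_x_plus.append(skill)
--     return skills_x_plus
-- ===== Notes on version B (the rewrite author's own statement) =====
-- stated objective: alternative
-- what changed: Replaces the Counter hash frequency table by sort-and-group: B sorts the concatenated list, reads each skill's total count off its run length in one grouping scan, then emits qualifiers in first-appearance order with a membership pass over the original list.
import Mathlib
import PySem

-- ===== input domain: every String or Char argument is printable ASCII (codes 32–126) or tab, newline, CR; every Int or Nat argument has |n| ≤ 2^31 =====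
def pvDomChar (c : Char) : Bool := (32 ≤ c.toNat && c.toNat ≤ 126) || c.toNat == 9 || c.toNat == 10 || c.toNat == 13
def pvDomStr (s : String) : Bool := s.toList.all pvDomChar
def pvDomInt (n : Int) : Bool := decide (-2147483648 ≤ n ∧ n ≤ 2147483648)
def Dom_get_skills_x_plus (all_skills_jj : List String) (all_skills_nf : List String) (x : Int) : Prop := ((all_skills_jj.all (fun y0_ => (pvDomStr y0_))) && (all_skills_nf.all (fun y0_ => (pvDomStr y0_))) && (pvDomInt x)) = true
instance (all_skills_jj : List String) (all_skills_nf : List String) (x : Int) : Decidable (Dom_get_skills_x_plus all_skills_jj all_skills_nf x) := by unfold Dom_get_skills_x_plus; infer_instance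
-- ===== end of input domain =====

-- B replaces the Counter frequency table by sort-and-group: sort the concatenation, read each
-- skill's count off its run length, then one pass in original order emits the qualifiers (alternative).

-- ===== PORT A =====
def get_skills_x_plus (all_skills_jj : List String) (all_skills_nf : List String) (x : Int) : List String :=
  let all_skills := all_skills_jj ++ all_skills_nf
  let all_skills_dict := PySem.Dict.counter all_skills
  all_skills_dict.items.foldl (fun skills_x_plus kv =>
    if x ≤ kv.2 then skills_x_plus ++ [kv.1] else skills_x_plus) []

-- ===== PORT B =====
-- Source B's grouping while-loop over the sorted list, as the obvious structural recursion on the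
-- remaining suffix: the inner 'while srt[j] == srt[i]' is the takeWhile/dropWhile split of the run.
def pvQual (x : Int) : List String → PySem.Set String
  | [] => PySem.Set.empty
  | a :: rest =>
    if x ≤ 1 + ((rest.takeWhile (· == a)).length : Int) then
      PySem.Set.add (pvQual x (rest.dropWhile (· == a))) a
    else
      pvQual x (rest.dropWhile (· == a))
termination_by l => l.length
decreasing_by
  all_goals
    exact Nat.lt_succ_of_le (List.length_dropWhile_le _ _)

def get_skills_x_plus_alt (all_skills_jj : List String) (all_skills_nf : List String) (x : Int) : List String :=
  let all_skills := all_skills_jj ++ all_skills_nf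
  let srt := PySem.List.sorted all_skills (fun s => s) false
  let qualifying := pvQual x srt
  all_skills.foldl (fun skills_x_plus skill =>
    if PySem.Set.contains qualifying skill && !(skills_x_plus.contains skill) then
      skills_x_plus ++ [skill]
    else skills_x_plus) []

-- ===== PRECONDITION & SPEC =====
def Spec_get_skills_x_plus (all_skills_jj : List String) (all_skills_nf : List String) (x : Int) (out : List String) : Prop := out = get_skills_x_plus_alt all_skills_jj all_skills_nf x
instance (all_skills_jj : List String) (all_skills_nf : List String) (x : Int) (out : List String) : Decidable (Spec_get_skills_x_plus all_skills_jj all_skills_nf x out) := by unfold Spec_get_skills_x_plus; infer_instance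

-- ===== CLAIM (what is proved, stated in full; the proofs are below) =====
def Claim_equal_get_skills_x_plus : Prop := ∀ (all_skills_jj : List String) (all_skills_nf : List String) (x : Int), Dom_get_skills_x_plus all_skills_jj all_skills_nf x → Spec_get_skills_x_plus all_skills_jj all_skills_nf x (get_skills_x_plus all_skills_jj all_skills_nf x)

-- ===== LEMMAS AND PROOFS =====

-- membership in pvQual of a ≤-sorted list = "present with count ≥ x"
theorem pvQual_head_facts (a : String) (rest : List String)
    (hl : (a :: rest).Pairwise (· ≤ ·)) :
    a ∉ rest.dropWhile (· == a) ∧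
    ((a :: rest).count a : Int) = 1 + ((rest.takeWhile (· == a)).length : Int) ∧
    (∀ v, v ≠ a → (a :: rest).count v = (rest.dropWhile (· == a)).count v) ∧
    (∀ v, v ≠ a → (v ∈ a :: rest ↔ v ∈ rest.dropWhile (· == a))) ∧
    (rest.dropWhile (· == a)).Pairwise (· ≤ ·) := by
  obtain ⟨ha, hrest⟩ := List.pairwise_cons.mp hl
  have hsplit : rest.takeWhile (· == a) ++ rest.dropWhile (· == a) = rest :=
    List.takeWhile_append_dropWhile
  have hrun : ∀ y ∈ rest.takeWhile (· == a), y = a := fun y hy =>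
    eq_of_beq (List.mem_takeWhile_imp (p := fun x => x == a) hy)
  have hremp : (rest.dropWhile (· == a)).Pairwise (· ≤ ·) :=
    hrest.sublist (List.dropWhile_sublist _)
  have hanotin : a ∉ rest.dropWhile (· == a) := by
    intro hmem
    cases hrem : rest.dropWhile (· == a) with
    | nil => rw [hrem] at hmem; exact (List.not_mem_nil hmem)
    | cons b t =>
      have hbne : ¬ (b == a) = true := by
        have h1 : rest.dropWhile (· == a) ≠ [] := by simp [hrem]
        have := List.head_dropWhile_not (· == a) h1
        simpa [hrem] using this
      have hbne' : b ≠ a := fun h => hbne (by simp [h])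
      have hab : a ≤ b := ha b (by
        rw [← hsplit]; exact List.mem_append_right _ (by simp [hrem]))
      rw [hrem] at hmem
      rcases List.mem_cons.mp hmem with h | h
      · exact hbne' h.symm
      · have hba : b ≤ a := (List.pairwise_cons.mp (hrem ▸ hremp)).1 a h
        exact hbne' (le_antisymm hba hab)
  refine ⟨hanotin, ?_, ?_, ?_, hremp⟩
  · have h1 : (rest.takeWhile (· == a)).count a = (rest.takeWhile (· == a)).length :=
      List.count_eq_length.mpr (fun b hb => (hrun b hb).symm)
    have h2 : (rest.dropWhile (· == a)).count a = 0 := List.count_eq_zero.mpr hanotin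
    have h3 : (a :: rest).count a = rest.count a + 1 := List.count_cons_self ..
    have hc : List.count a rest = (rest.takeWhile (· == a)).length := by
      conv_lhs => rw [← hsplit]
      rw [List.count_append, h1, h2]
      omega
    rw [h3, hc]
    push_cast; ring
  · intro v hv
    have h1 : (rest.takeWhile (· == a)).count v = 0 :=
      List.count_eq_zero.mpr (fun hm => hv (hrun v hm))
    have hr : List.count v rest = List.count v (rest.dropWhile (· == a)) := by
      conv_lhs => rw [← hsplit]
      rw [List.count_append, h1]
      omega
    calc List.count v (a :: rest) = List.count v rest := by simp [Ne.symm hv]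
      _ = List.count v (rest.dropWhile (· == a)) := hr
  · intro v hv
    constructor
    · intro hm
      rcases List.mem_cons.mp hm with h | h
      · exact absurd h hv
      · rw [← hsplit] at h
        rcases List.mem_append.mp h with h | h
        · exact absurd (hrun v h) hv
        · exact h
    · intro hm
      exact List.mem_cons_of_mem _ (by rw [← hsplit]; exact List.mem_append_right _ hm)

theorem mem_pvQual (x : Int) (l : List String) (hl : l.Pairwise (· ≤ ·)) (v : String) :
    v ∈ pvQual x l ↔ v ∈ l ∧ x ≤ (l.count v : Int) := by
  induction l using pvQual.induct x with
  | case1 => simp [pvQual, PySem.Set.empty]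
  | case2 a rest hx ih =>
    obtain ⟨hno, hca, hcne, hmne, hremp⟩ := pvQual_head_facts a rest hl
    rw [pvQual, if_pos hx]
    by_cases hva : v = a
    · subst hva
      simp only [PySem.Set.mem_add]
      constructor
      · intro _; exact ⟨List.mem_cons_self, by rw [hca]; exact hx⟩
      · intro _; simp
    · rw [PySem.Set.mem_add, ih hremp, hcne v hva, hmne v hva]
      simp [hva]
  | case3 a rest hx ih =>
    obtain ⟨hno, hca, hcne, hmne, hremp⟩ := pvQual_head_facts a rest hl
    rw [pvQual, if_neg hx]
    by_cases hva : v = a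
    · subst hva
      rw [ih hremp]
      constructor
      · rintro ⟨hm, -⟩; exact absurd hm hno
      · rintro ⟨-, hc⟩; rw [hca] at hc; exact absurd hc hx
    · rw [ih hremp, hcne v hva, hmne v hva]

-- Source B's second loop: collecting the qualifiers in first-appearance order is a filter of the dedup
theorem pvCollect_eq (q : String → Bool) (xs : List String) :
    ∀ (seen : List String), seen.Nodup →
    xs.foldl (fun res s => if q s && !(res.contains s) then res ++ [s] else res) (seen.filter q)
      = (PySem.Set.update seen xs).filter q := by
  induction xs with
  | nil => intro seen _; simp [PySem.Set.update]
  | cons a t ih =>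
    intro seen hnd
    have hupd : PySem.Set.update seen (a :: t) = PySem.Set.update (PySem.Set.add seen a) t :=
      PySem.Set.update_cons ..
    have hstep : (if q a && !((seen.filter q).contains a) then seen.filter q ++ [a]
        else seen.filter q) = (PySem.Set.add seen a).filter q := by
      by_cases hma : a ∈ seen
      · rw [PySem.Set.add_of_mem hma]
        by_cases hqa : q a = true
        · have hct : (seen.filter q).contains a = true := by
            simp [List.mem_filter, hma, hqa]
          rw [hct]
          simp
        · have hqa' : q a = false := by simpa using hqa
          simp [hqa']
      · rw [PySem.Set.add_of_not_mem hma, List.filter_append]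
        have hnc : (seen.filter q).contains a = false := by
          simp [List.mem_filter, hma]
        by_cases hqa : q a = true
        · rw [hnc]
          simp [hqa]
        · have hqa' : q a = false := by simpa using hqa
          rw [hnc]
          simp [hqa']
    have hnd' : (PySem.Set.add seen a).Nodup := PySem.Set.nodup_add seen a hnd
    calc (a :: t).foldl (fun res s => if q s && !(res.contains s) then res ++ [s] else res)
          (seen.filter q)
        = t.foldl (fun res s => if q s && !(res.contains s) then res ++ [s] else res)
          ((PySem.Set.add seen a).filter q) := by rw [List.foldl_cons, hstep]
      _ = (PySem.Set.update (PySem.Set.add seen a) t).filter q := ih _ hnd'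
      _ = (PySem.Set.update seen (a :: t)).filter q := by rw [hupd]

-- ===== VERDICT (by name: the statement is the Claim_ definition above) =====
theorem get_skills_x_plus_spec : Claim_equal_get_skills_x_plus := by
  intro jj nf x _
  show (PySem.Dict.counter (jj ++ nf)).items.foldl
      (fun skills_x_plus kv => if x ≤ kv.2 then skills_x_plus ++ [kv.1] else skills_x_plus) []
    = (jj ++ nf).foldl (fun res s =>
        if PySem.Set.contains (pvQual x (PySem.List.sorted (jj ++ nf) (fun s => s) false)) s
            && !(res.contains s) then res ++ [s] else res) []
  have hB := pvCollect_eq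
      (fun s => PySem.Set.contains (pvQual x (PySem.List.sorted (jj ++ nf) (fun s => s) false)) s)
      (jj ++ nf) [] List.nodup_nil
  simp only [List.filter_nil] at hB
  rw [hB, PySem.Dict.items_counter,
      PySem.List.foldl_append_ite (fun kv : String × Int => x ≤ kv.2) (fun kv => kv.1),
      List.filter_map]
  simp only [PySem.Set.update_nil_left, Function.comp_def, List.nil_append, List.map_map,
      List.map_id']
  apply List.filter_congr
  intro s hs
  have hsall : s ∈ jj ++ nf := (PySem.Set.mem_ofList _ _).1 hs
  have hq := mem_pvQual x (PySem.List.sorted (jj ++ nf) (fun s => s) false)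
      (PySem.List.sorted_pairwise (jj ++ nf) (fun s => s)) s
  rw [PySem.List.mem_sorted, (PySem.List.sorted_perm (jj ++ nf) (fun s => s) false).count_eq] at hq
  simp [hq, hsall]
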